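-- pv_equiv track=rewrite | github.com/Monsau/contract-ingestion | src/handlers/ingestion_handler.py | select_priority_tags
-- ===== SOURCE A (Python) =====
-- def select_priority_tags(contract_tags):
--     """Select priority tags based on hierarchy: Vehicle > Inverter > Volume > forecast > Assets > Asset"""
--     if not contract_tags:
--         return ['Bronze']
--
--     # Priority order (highest to lowest)
--     priority_order = ['Vehicle', 'Inverter', 'Volume', 'forecast', 'Assets', 'Asset']
--
--     # Find the highest priority tag
--     for priority_tag in priority_order:
--         if priority_tag in contract_tags:
--             return [priority_tag]
--
--     # If no priority tags found, return the first available tag or default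
--     return [contract_tags[0]] if contract_tags else ['Bronze']
-- ===== SOURCE B (Python) =====
-- def select_priority_tags(contract_tags):
--     """Select priority tags based on hierarchy: Vehicle > Inverter > Volume > forecast > Assets > Asset"""
--     if not contract_tags:
--         return ['Bronze']
--     rank = {'Vehicle': 0, 'Inverter': 1, 'Volume': 2, 'forecast': 3, 'Assets': 4, 'Asset': 5}
--     candidates = [t for t in contract_tags if t in rank]
--     if not candidates:
--         return [contract_tags[0]]
--     return [min(candidates, key=rank.get)]
-- ===== Notes on version B (the rewrite author's own statement) =====
-- stated objective: alternative
-- what changed: Instead of scanning the fixed priority list and testing membership in contract_tags for each priority, B builds a rank dict, filters contract_tags once for ranked tags, and returns the candidate with minimal rank via min(..., key=rank.get).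
import Mathlib
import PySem

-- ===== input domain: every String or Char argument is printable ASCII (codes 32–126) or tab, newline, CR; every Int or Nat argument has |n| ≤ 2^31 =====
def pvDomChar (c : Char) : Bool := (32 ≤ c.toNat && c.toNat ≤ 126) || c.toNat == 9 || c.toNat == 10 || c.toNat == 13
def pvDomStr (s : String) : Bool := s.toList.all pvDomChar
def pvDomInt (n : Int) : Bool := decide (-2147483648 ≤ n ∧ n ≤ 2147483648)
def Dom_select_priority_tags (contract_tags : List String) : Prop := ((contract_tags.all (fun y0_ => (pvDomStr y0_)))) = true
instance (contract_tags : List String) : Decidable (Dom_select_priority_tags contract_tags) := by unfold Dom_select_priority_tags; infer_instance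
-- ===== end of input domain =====

-- B replaces A's scan over the fixed priority list (membership-testing contract_tags per priority)
-- by a rank dict + one filter over contract_tags + min-by-rank; alternative decomposition, same cost class.


-- ===== PORT A =====
-- the literal priority_order list of A
def pvPriorityOrder : List String := ["Vehicle", "Inverter", "Volume", "forecast", "Assets", "Asset"]

-- A's 'for priority_tag in priority_order: if priority_tag in contract_tags: return [priority_tag]'
def pvScan : List String → List String → Option String
  | [], _ => none
  | p :: rest, tags => if tags.contains p then some p else pvScan rest tags

def select_priority_tags (contract_tags : List String) : List String :=
  if contract_tags = [] then ["Bronze"]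
  else
    match pvScan pvPriorityOrder contract_tags with
    | some p => [p]
    | none =>
      -- return [contract_tags[0]] if contract_tags else ['Bronze']
      match contract_tags with
      | [] => ["Bronze"]
      | t :: _ => [t]

-- ===== PORT B =====
def pvRank : PySem.Dict String Int :=
  PySem.Dict.ofList [("Vehicle", 0), ("Inverter", 1), ("Volume", 2), ("forecast", 3), ("Assets", 4), ("Asset", 5)]

def select_priority_tags_alt (contract_tags : List String) : List String :=
  if contract_tags = [] then ["Bronze"]
  else
    let candidates := contract_tags.filter (fun t => pvRank.contains t)
    if candidates = [] then
      match contract_tags with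
      | [] => ["Bronze"]
      | t :: _ => [t]
    else
      -- min(candidates, key=rank.get); every candidate is a key of rank, so getD's default is never used
      match PySem.List.min? candidates (fun t => pvRank.getD t 0) with
      | some m => [m]
      | none => ["Bronze"]

-- ===== PRECONDITION & SPEC =====
def Spec_select_priority_tags (contract_tags : List String) (out : List String) : Prop := out = select_priority_tags_alt contract_tags
instance (contract_tags : List String) (out : List String) : Decidable (Spec_select_priority_tags contract_tags out) := by unfold Spec_select_priority_tags; infer_instance

-- ===== CLAIM (what is proved, stated in full; the proofs are below) =====
def Claim_equal_select_priority_tags : Prop := ∀ (contract_tags : List String), Dom_select_priority_tags contract_tags → Spec_select_priority_tags contract_tags (select_priority_tags contract_tags)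

-- ===== LEMMAS AND PROOFS =====
theorem pvRank_mk : pvRank = PySem.Dict.mk [("Vehicle", 0), ("Inverter", 1), ("Volume", 2), ("forecast", 3), ("Assets", 4), ("Asset", 5)] := by
  decide

set_option maxRecDepth 8192 in
theorem pvRank_contains_iff (t : String) : pvRank.contains t = true ↔ t ∈ pvPriorityOrder := by
  simp [pvRank_mk, pvPriorityOrder]
  tauto

theorem pv_min_filter_eq (tags : List String) (p : String)
    (hp : p ∈ pvPriorityOrder) (hpt : p ∈ tags)
    (hmin : ∀ q ∈ pvPriorityOrder, q ∈ tags → pvRank.getD p 0 ≤ pvRank.getD q 0) :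
    PySem.List.min? (tags.filter (fun t => pvRank.contains t)) (fun t => pvRank.getD t 0) = some p := by
  have hc : p ∈ tags.filter (fun t => pvRank.contains t) :=
    List.mem_filter.mpr ⟨hpt, (pvRank_contains_iff p).mpr hp⟩
  obtain ⟨m, hm⟩ : ∃ m, PySem.List.min? (tags.filter (fun t => pvRank.contains t)) (fun t => pvRank.getD t 0) = some m := by
    cases h : PySem.List.min? (tags.filter (fun t => pvRank.contains t)) (fun t => pvRank.getD t 0) with
    | none =>
      exact absurd ((PySem.List.min?_eq_none_iff _ _).mp h ▸ hc) (List.not_mem_nil)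
    | some m => exact ⟨m, rfl⟩
  have hmf := List.mem_filter.mp (PySem.List.min?_mem hm)
  have hmp : m ∈ pvPriorityOrder := (pvRank_contains_iff m).mp hmf.2
  have h1 : pvRank.getD m 0 ≤ pvRank.getD p 0 := PySem.List.min?_isMin hm p hc
  have h2 : pvRank.getD p 0 ≤ pvRank.getD m 0 := hmin m hmp hmf.1
  have heq : pvRank.getD m 0 = pvRank.getD p 0 := le_antisymm h1 h2
  rw [hm]
  -- the rank is injective on the six priority names
  simp only [pvPriorityOrder, List.mem_cons, List.not_mem_nil, or_false] at hp hmp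
  rcases hmp with rfl | rfl | rfl | rfl | rfl | rfl <;>
    rcases hp with rfl | rfl | rfl | rfl | rfl | rfl <;>
      first
        | rfl
        | (exfalso; revert heq; decide)

-- B returns [p] once p is known to be the highest-priority tag present
theorem pv_alt_eq (tags : List String) (p : String) (h0 : ¬ tags = [])
    (hp : p ∈ pvPriorityOrder) (hpt : p ∈ tags)
    (hmin : ∀ q ∈ pvPriorityOrder, q ∈ tags → pvRank.getD p 0 ≤ pvRank.getD q 0) :
    select_priority_tags_alt tags = [p] := by
  have hc : p ∈ tags.filter (fun t => pvRank.contains t) :=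
    List.mem_filter.mpr ⟨hpt, (pvRank_contains_iff p).mpr hp⟩
  have hne : ¬ tags.filter (fun t => pvRank.contains t) = [] := by
    intro h; rw [h] at hc; exact List.not_mem_nil hc
  simp only [select_priority_tags_alt, if_neg h0, if_neg hne,
    pv_min_filter_eq tags p hp hpt hmin]

-- ===== VERDICT (by name: the statement is the Claim_ definition above) =====
theorem select_priority_tags_spec : Claim_equal_select_priority_tags := by
  intro tags _
  unfold Spec_select_priority_tags
  by_cases h0 : tags = []
  · simp [select_priority_tags, select_priority_tags_alt, h0]
  · by_cases h1 : "Vehicle" ∈ tags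
    case pos =>
      rw [pv_alt_eq tags "Vehicle" h0 (by decide) h1 ?_]
      · simp [select_priority_tags, if_neg h0, pvScan, pvPriorityOrder, h1]
      · intro q hq hqt
        simp only [pvPriorityOrder, List.mem_cons, List.not_mem_nil, or_false] at hq
        rcases hq with rfl | rfl | rfl | rfl | rfl | rfl <;> decide
    case neg =>
    by_cases h2 : "Inverter" ∈ tags
    case pos =>
      rw [pv_alt_eq tags "Inverter" h0 (by decide) h2 ?_]
      · simp [select_priority_tags, if_neg h0, pvScan, pvPriorityOrder, h1, h2]
      · intro q hq hqt
        simp only [pvPriorityOrder, List.mem_cons, List.not_mem_nil, or_false] at hq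
        rcases hq with rfl | rfl | rfl | rfl | rfl | rfl <;>
          first | exact absurd hqt h1 | decide
    case neg =>
    by_cases h3 : "Volume" ∈ tags
    case pos =>
      rw [pv_alt_eq tags "Volume" h0 (by decide) h3 ?_]
      · simp [select_priority_tags, if_neg h0, pvScan, pvPriorityOrder, h1, h2, h3]
      · intro q hq hqt
        simp only [pvPriorityOrder, List.mem_cons, List.not_mem_nil, or_false] at hq
        rcases hq with rfl | rfl | rfl | rfl | rfl | rfl <;>
          first | exact absurd hqt h1 | exact absurd hqt h2 | decide
    case neg =>
    by_cases h4 : "forecast" ∈ tags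
    case pos =>
      rw [pv_alt_eq tags "forecast" h0 (by decide) h4 ?_]
      · simp [select_priority_tags, if_neg h0, pvScan, pvPriorityOrder, h1, h2, h3, h4]
      · intro q hq hqt
        simp only [pvPriorityOrder, List.mem_cons, List.not_mem_nil, or_false] at hq
        rcases hq with rfl | rfl | rfl | rfl | rfl | rfl <;>
          first | exact absurd hqt h1 | exact absurd hqt h2 | exact absurd hqt h3 | decide
    case neg =>
    by_cases h5 : "Assets" ∈ tags
    case pos =>
      rw [pv_alt_eq tags "Assets" h0 (by decide) h5 ?_]
      · simp [select_priority_tags, if_neg h0, pvScan, pvPriorityOrder, h1, h2, h3, h4, h5]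
      · intro q hq hqt
        simp only [pvPriorityOrder, List.mem_cons, List.not_mem_nil, or_false] at hq
        rcases hq with rfl | rfl | rfl | rfl | rfl | rfl <;>
          first | exact absurd hqt h1 | exact absurd hqt h2 | exact absurd hqt h3 | exact absurd hqt h4 | decide
    case neg =>
    by_cases h6 : "Asset" ∈ tags
    case pos =>
      rw [pv_alt_eq tags "Asset" h0 (by decide) h6 ?_]
      · simp [select_priority_tags, if_neg h0, pvScan, pvPriorityOrder, h1, h2, h3, h4, h5, h6]
      · intro q hq hqt
        simp only [pvPriorityOrder, List.mem_cons, List.not_mem_nil, or_false] at hq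
        rcases hq with rfl | rfl | rfl | rfl | rfl | rfl <;>
          first | exact absurd hqt h1 | exact absurd hqt h2 | exact absurd hqt h3 | exact absurd hqt h4 | exact absurd hqt h5 | decide
    case neg =>
      -- no priority tag present: both fall back to [tags[0]]
      have hfil : tags.filter (fun t => pvRank.contains t) = [] := by
        rw [List.filter_eq_nil_iff]
        intro t ht hc
        have : t ∈ pvPriorityOrder := (pvRank_contains_iff t).mp hc
        simp only [pvPriorityOrder, List.mem_cons, List.not_mem_nil, or_false] at this
        rcases this with rfl | rfl | rfl | rfl | rfl | rfl
        · exact h1 ht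
        · exact h2 ht
        · exact h3 ht
        · exact h4 ht
        · exact h5 ht
        · exact h6 ht
      have hscan : pvScan pvPriorityOrder tags = none := by
        simp [pvScan, pvPriorityOrder, h1, h2, h3, h4, h5, h6]
      simp [select_priority_tags, select_priority_tags_alt, if_neg h0, hscan, hfil]
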